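-- pv_equiv track=rewrite | github.com/bita-alexandru/College-Homework | CALCUL-NUMERIC/tema5/t5.py | get_i
-- ===== SOURCE A (Python) =====
-- def get_i(row, col, n):
--     # if row < col:
--     #     row, col = col, row
--
--     # i = col*(n-1) - col*(col-1) // 2 + row
--     if col > row:
--         col, row = row, col
--
--     cnt = 0
--     for i in range(row):
--         for j in range(i+1):
--             cnt += 1
--
--     for j in range(col):
--         cnt += 1
--
--     return cnt
-- ===== SOURCE B (Python) =====
-- def get_i(row, col, n):
--     # Closed form for the packed triangular index: with hi >= lo,
--     # sum_{i<hi}(i+1) = hi*(hi+1)//2 triangle entries before row hi, plus lo.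
--     # Negative bounds contribute nothing (empty ranges), hence the clamps to 0.
--     hi = max(row, col, 0)
--     lo = max(min(row, col), 0)
--     return hi * (hi + 1) // 2 + lo
-- ===== Notes on version B (the rewrite author's own statement) =====
-- stated objective: faster
-- what changed: Replaced A's O(row^2) nested counting loops by the closed-form triangular-number formula max(row,col,0)*(max(row,col,0)+1)//2 + max(min(row,col),0).
import Mathlib
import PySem

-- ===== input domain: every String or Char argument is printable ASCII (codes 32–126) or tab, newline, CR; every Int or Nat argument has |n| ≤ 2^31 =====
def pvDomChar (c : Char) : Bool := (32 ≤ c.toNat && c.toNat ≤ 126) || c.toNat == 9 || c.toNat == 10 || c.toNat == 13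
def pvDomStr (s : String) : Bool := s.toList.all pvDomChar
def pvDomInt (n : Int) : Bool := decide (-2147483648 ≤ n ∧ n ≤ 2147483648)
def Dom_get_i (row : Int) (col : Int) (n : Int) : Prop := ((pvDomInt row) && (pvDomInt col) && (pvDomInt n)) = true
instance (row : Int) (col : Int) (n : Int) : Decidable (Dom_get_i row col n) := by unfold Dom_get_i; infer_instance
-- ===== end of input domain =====

-- B replaces A's O(row^2) nested counting loops by the closed-form triangular index
-- max(row,col,0)*(max(row,col,0)+1)//2 + max(min(row,col),0); objective: faster (asymptotic).

-- ===== PORT A =====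
def get_i (row : Int) (col : Int) (n : Int) : Int :=
  -- if col > row: col, row = row, col
  let p := if col > row then (row, col) else (col, row)
  let col := p.1
  let row := p.2
  let cnt : Int := 0
  -- for i in range(row): for j in range(i+1): cnt += 1
  let cnt := (PySem.List.pyRange 0 row 1).foldl
    (fun cnt i => (PySem.List.pyRange 0 (i+1) 1).foldl (fun cnt _ => cnt + 1) cnt) cnt
  -- for j in range(col): cnt += 1
  let cnt := (PySem.List.pyRange 0 col 1).foldl (fun cnt _ => cnt + 1) cnt
  cnt

-- ===== PORT B =====
def get_i_alt (row : Int) (col : Int) (n : Int) : Int :=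
  let hi := max (max row col) 0
  let lo := max (min row col) 0
  PySem.Int.floordiv (hi * (hi + 1)) 2 + lo

-- ===== PRECONDITION & SPEC =====
def Spec_get_i (row : Int) (col : Int) (n : Int) (out : Int) : Prop := out = get_i_alt row col n
instance (row : Int) (col : Int) (n : Int) (out : Int) : Decidable (Spec_get_i row col n out) := by unfold Spec_get_i; infer_instance

-- ===== CLAIM (what is proved, stated in full; the proofs are below) =====
def Claim_equal_get_i : Prop := ∀ (row : Int) (col : Int) (n : Int), Dom_get_i row col n → Spec_get_i row col n (get_i row col n)

-- ===== LEMMAS AND PROOFS =====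

-- counting loop 'for j in range(k): cnt += 1' adds max k 0
theorem pv_count_loop (k a : Int) :
    (PySem.List.pyRange 0 k 1).foldl (fun c _ => c + 1) a = a + max k 0 := by
  rw [PySem.List.pyRange_one]
  rw [show (k - 0) = k by ring]
  rw [← Int.ofNat_toNat]
  generalize k.toNat = m
  induction m generalizing a with
  | zero => simp
  | succ m ih =>
    rw [List.range_succ]
    simp only [List.map_append, List.foldl_append, List.map_cons, List.map_nil,
      List.foldl_cons, List.foldl_nil, ih]
    push_cast; ring

-- nested loop over range(m) equals the triangular number m*(m+1)/2
theorem pv_nested_loop (m : Nat) (a : Int) :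
    (PySem.List.pyRange 0 (m : Int) 1).foldl
      (fun cnt i => (PySem.List.pyRange 0 (i+1) 1).foldl (fun c _ => c + 1) cnt) a
    = a + (m * (m + 1)) / 2 := by
  induction m generalizing a with
  | zero => simp [PySem.List.pyRange_one_eq_nil]
  | succ m ih =>
    rw [show ((m + 1 : Nat) : Int) = (m : Int) + 1 by push_cast; ring,
      PySem.List.pyRange_one_succ_right (by positivity)]
    rw [List.foldl_append]
    simp only [List.foldl_cons, List.foldl_nil]
    rw [ih, pv_count_loop]
    have h1 : max ((m : Int) + 1) 0 = (m : Int) + 1 := by omega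
    rw [h1, show ((m:Int) + 1) * (((m:Int) + 1) + 1) = (m:Int) * ((m:Int) + 1) + ((m:Int) + 1) * 2 from by ring,
      Int.add_mul_ediv_right _ _ (by norm_num : (2:Int) ≠ 0)]
    ring

theorem pv_nested_loop_int (r a : Int) :
    (PySem.List.pyRange 0 r 1).foldl
      (fun cnt i => (PySem.List.pyRange 0 (i+1) 1).foldl (fun c _ => c + 1) cnt) a
    = a + (max r 0 * (max r 0 + 1)) / 2 := by
  by_cases h : r ≤ 0
  · rw [PySem.List.pyRange_one_eq_nil (by omega)]
    have : max r 0 = 0 := by omega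
    simp [this]
  · have hr : r = (r.toNat : Int) := by omega
    rw [hr, pv_nested_loop]
    have : max ((r.toNat : Int)) 0 = (r.toNat : Int) := by omega
    rw [this]

-- ===== VERDICT (by name: the statement is the Claim_ definition above) =====
theorem get_i_spec : Claim_equal_get_i := by
  intro row col n _
  unfold Spec_get_i get_i get_i_alt
  by_cases h : col ≤ row
  · rw [if_neg (by omega)]
    simp only
    rw [pv_nested_loop_int, pv_count_loop,
      PySem.Int.floordiv_eq_ediv_of_pos (by norm_num)]
    have h1 : max (max row col) 0 = max row 0 := by omega
    have h2 : max (min row col) 0 = max col 0 := by omega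
    rw [h1, h2]; ring
  · rw [if_pos (by omega)]
    simp only
    rw [pv_nested_loop_int, pv_count_loop,
      PySem.Int.floordiv_eq_ediv_of_pos (by norm_num)]
    have h1 : max (max row col) 0 = max col 0 := by omega
    have h2 : max (min row col) 0 = max row 0 := by omega
    rw [h1, h2]; ring
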